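-- pv_equiv track=rewrite | github.com/MelikbekyanAshot/PythonMIREA | task1/solution.py | f13
-- ===== SOURCE A (Python) =====
-- def f13(n, m):
--     a = 0
--     for i in range (1, n+1):
--         for j in range(1, m+1):
--             a += (j - 62*i**5)
--
--     b = 0
--     for i in range (1, n+1):
--         for j in range(1, m+1):
--             b += (62*i**3 + j**2)
--
--     return a - b
-- ===== SOURCE B (Python) =====
-- def f13(n, m):
--     # Closed form: sum_{i=1..n} sum_{j=1..m} ((j - 62*i**5) - (62*i**3 + j**2))
--     if n < 1 or m < 1:
--         return 0
--     S1 = m * (m + 1) // 2                                   # sum j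
--     S2 = m * (m + 1) * (2 * m + 1) // 6                     # sum j^2
--     T3 = (n * (n + 1) // 2) ** 2                            # sum i^3
--     T5 = n * n * (n + 1) * (n + 1) * (2 * n * n + 2 * n - 1) // 12   # sum i^5
--     return n * S1 - 62 * m * (T5 + T3) - n * S2
-- ===== Notes on version B (the rewrite author's own statement) =====
-- stated objective: faster
-- what changed: Replaced the two nested O(n*m) summation loops by a closed-form expression built from the power-sum formulas for j, j^2, i^3 and i^5.
import Mathlib
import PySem

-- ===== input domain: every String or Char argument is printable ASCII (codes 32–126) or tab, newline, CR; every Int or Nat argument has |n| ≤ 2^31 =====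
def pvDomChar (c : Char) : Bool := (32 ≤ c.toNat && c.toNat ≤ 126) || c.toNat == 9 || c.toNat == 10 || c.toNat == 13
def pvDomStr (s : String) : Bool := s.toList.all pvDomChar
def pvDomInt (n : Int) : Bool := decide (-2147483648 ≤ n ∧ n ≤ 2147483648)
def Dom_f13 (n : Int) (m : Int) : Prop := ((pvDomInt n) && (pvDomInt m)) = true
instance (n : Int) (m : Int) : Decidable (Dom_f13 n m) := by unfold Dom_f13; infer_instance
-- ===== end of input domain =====

-- B replaces A's two nested summation loops by a closed-form expression from power-sum formulas (objective: faster).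


-- ===== PORT A =====
def f13 (n : Int) (m : Int) : Int :=
  let a : Int := (PySem.List.pyRange 1 (n+1) 1).foldl
    (fun a i => (PySem.List.pyRange 1 (m+1) 1).foldl
      (fun a j => a + (j - 62 * i ^ 5)) a) 0
  let b : Int := (PySem.List.pyRange 1 (n+1) 1).foldl
    (fun b i => (PySem.List.pyRange 1 (m+1) 1).foldl
      (fun b j => b + (62 * i ^ 3 + j ^ 2)) b) 0
  a - b

-- ===== PORT B =====
def f13_alt (n : Int) (m : Int) : Int :=
  if n < 1 ∨ m < 1 then 0
  else
    let S1 := PySem.Int.floordiv (m * (m + 1)) 2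
    let S2 := PySem.Int.floordiv (m * (m + 1) * (2 * m + 1)) 6
    let T3 := (PySem.Int.floordiv (n * (n + 1)) 2) ^ 2
    let T5 := PySem.Int.floordiv (n * n * (n + 1) * (n + 1) * (2 * n * n + 2 * n - 1)) 12
    n * S1 - 62 * m * (T5 + T3) - n * S2

-- ===== PRECONDITION & SPEC =====
def Spec_f13 (n : Int) (m : Int) (out : Int) : Prop := out = f13_alt n m
instance (n : Int) (m : Int) (out : Int) : Decidable (Spec_f13 n m out) := by unfold Spec_f13; infer_instance

-- ===== CLAIM (what is proved, stated in full; the proofs are below) =====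
def Claim_equal_f13 : Prop := ∀ (n : Int) (m : Int), Dom_f13 n m → Spec_f13 n m (f13 n m)

-- ===== LEMMAS AND PROOFS =====

-- foldl of repeated addition is init + sum of images
theorem foldl_add_sum (f : Int → Int) (l : List Int) (init : Int) :
    l.foldl (fun a x => a + f x) init = init + (l.map f).sum := by
  induction l generalizing init with
  | nil => simp
  | cons x xs ih => simp [ih, add_assoc]

-- sum of a mapped List.range as a Finset.range sum
theorem sum_map_list_range (g : ℕ → Int) (N : ℕ) :
    ((List.range N).map g).sum = ∑ x ∈ Finset.range N, g x := by
  induction N with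
  | zero => simp
  | succ N ih => rw [List.range_succ, Finset.sum_range_succ]; simp [ih]

-- a 1-based Python range sum as a Finset.range sum
theorem sum_pyRange_one (k : Int) (f : Int → Int) :
    ((PySem.List.pyRange 1 (k+1) 1).map f).sum
      = ∑ j ∈ Finset.range k.toNat, f (1 + (j : Int)) := by
  rw [PySem.List.pyRange_one]
  simp only [List.map_map, Function.comp_def]
  rw [show k + 1 - 1 = k from by ring, sum_map_list_range]

theorem twelve_s1 (M : ℕ) :
    2 * ∑ j ∈ Finset.range M, (1 + (j : Int)) = (M : Int) * (M + 1) := by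
  induction M with
  | zero => simp
  | succ M ih => rw [Finset.sum_range_succ]; push_cast; push_cast at ih; ring_nf; ring_nf at ih; linarith

theorem twelve_s2 (M : ℕ) :
    6 * ∑ j ∈ Finset.range M, (1 + (j : Int)) ^ 2 = (M : Int) * (M + 1) * (2 * M + 1) := by
  induction M with
  | zero => simp
  | succ M ih => rw [Finset.sum_range_succ]; push_cast; push_cast at ih; ring_nf; ring_nf at ih; linarith

theorem twelve_s3 (M : ℕ) :
    4 * ∑ j ∈ Finset.range M, (1 + (j : Int)) ^ 3 = ((M : Int) * (M + 1)) ^ 2 := by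
  induction M with
  | zero => simp
  | succ M ih => rw [Finset.sum_range_succ]; push_cast; push_cast at ih; ring_nf; ring_nf at ih; linarith

theorem twelve_s5 (M : ℕ) :
    12 * ∑ j ∈ Finset.range M, (1 + (j : Int)) ^ 5
      = (M : Int) * M * (M + 1) * (M + 1) * (2 * M * M + 2 * M - 1) := by
  induction M with
  | zero => simp
  | succ M ih => rw [Finset.sum_range_succ]; push_cast; push_cast at ih; ring_nf; ring_nf at ih; linarith

-- A as nested Finset sums
theorem f13_as_sums (n m : Int) :
    f13 n m = ∑ i ∈ Finset.range n.toNat, ∑ j ∈ Finset.range m.toNat,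
      (((1 + (j:Int)) - 62 * (1 + (i:Int)) ^ 5) - (62 * (1 + (i:Int)) ^ 3 + (1 + (j:Int)) ^ 2)) := by
  unfold f13
  have hinner : ∀ (g : Int → Int) (init : Int),
      (PySem.List.pyRange 1 (m+1) 1).foldl (fun a j => a + g j) init
        = init + ∑ j ∈ Finset.range m.toNat, g (1 + (j:Int)) := by
    intro g init
    rw [foldl_add_sum, sum_pyRange_one]
  simp only [hinner]
  rw [show (fun (a : Int) (i : Int) =>
        a + ∑ j ∈ Finset.range m.toNat, ((1 + (j:Int)) - 62 * i ^ 5))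
      = fun a i => a + (fun i => ∑ j ∈ Finset.range m.toNat, ((1 + (j:Int)) - 62 * i ^ 5)) i from rfl]
  rw [foldl_add_sum, sum_pyRange_one]
  rw [show (fun (b : Int) (i : Int) =>
        b + ∑ j ∈ Finset.range m.toNat, (62 * i ^ 3 + (1 + (j:Int)) ^ 2))
      = fun b i => b + (fun i => ∑ j ∈ Finset.range m.toNat, (62 * i ^ 3 + (1 + (j:Int)) ^ 2)) i from rfl]
  rw [foldl_add_sum, sum_pyRange_one]
  simp [← Finset.sum_sub_distrib]

theorem exact_fdiv {a b q : Int} (hb : b ≠ 0) (h : a = b * q) : PySem.Int.floordiv a b = q := by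
  subst h
  simp [PySem.Int.floordiv, Int.mul_fdiv_cancel_left _ hb]

-- ===== VERDICT (by name: the statement is the Claim_ definition above) =====
theorem f13_spec : Claim_equal_f13 := by
  intro n m _
  show f13 n m = f13_alt n m
  rw [f13_as_sums]
  unfold f13_alt
  by_cases h : n < 1 ∨ m < 1
  · rw [if_pos h]
    rcases h with h | h
    · have : n.toNat = 0 := by omega
      simp [this]
    · have : m.toNat = 0 := by omega
      simp [this]
  · rw [if_neg h]
    rw [not_or, not_lt, not_lt] at h
    obtain ⟨hn, hm⟩ := h
    have hncast : ((n.toNat : Int)) = n := Int.toNat_of_nonneg (by omega)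
    have hmcast : ((m.toNat : Int)) = m := Int.toNat_of_nonneg (by omega)
    set N := n.toNat
    set M := m.toNat
    -- evaluate B's exact floor divisions
    rw [exact_fdiv (by norm_num)
        (show m * (m + 1) = 2 * ∑ j ∈ Finset.range M, (1 + (j:Int)) by
          rw [twelve_s1 M, hmcast]),
      exact_fdiv (by norm_num)
        (show m * (m + 1) * (2 * m + 1) = 6 * ∑ j ∈ Finset.range M, (1 + (j:Int)) ^ 2 by
          rw [twelve_s2 M, hmcast]),
      exact_fdiv (by norm_num)
        (show n * (n + 1) = 2 * ∑ i ∈ Finset.range N, (1 + (i:Int)) by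
          rw [twelve_s1 N, hncast]),
      exact_fdiv (by norm_num)
        (show n * n * (n + 1) * (n + 1) * (2 * n * n + 2 * n - 1)
            = 12 * ∑ i ∈ Finset.range N, (1 + (i:Int)) ^ 5 by
          rw [twelve_s5 N, hncast])]
    -- split the double sum into the four one-variable sums
    have hsplit : ∀ i : Int,
        ∑ j ∈ Finset.range M, (((1 + (j:Int)) - 62 * i ^ 5) - (62 * i ^ 3 + (1 + (j:Int)) ^ 2))
          = (∑ j ∈ Finset.range M, (1 + (j:Int)))
            - (M : Int) * (62 * i ^ 5) - (M : Int) * (62 * i ^ 3)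
            - ∑ j ∈ Finset.range M, (1 + (j:Int)) ^ 2 := by
      intro i
      simp only [Finset.sum_sub_distrib, Finset.sum_add_distrib, Finset.sum_const,
        Finset.card_range, nsmul_eq_mul]
      ring
    simp only [hsplit]
    have h3eq : (∑ i ∈ Finset.range N, (1 + (i:Int)))^2
        = ∑ i ∈ Finset.range N, (1 + (i:Int))^3 := by
      have h1 := twelve_s1 N
      have h3 := twelve_s3 N
      have h4 : (4:Int) * (∑ i ∈ Finset.range N, (1 + (i:Int)))^2
          = 4 * ∑ i ∈ Finset.range N, (1 + (i:Int))^3 := by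
        rw [h3, ← h1]; ring
      linarith
    simp only [Finset.sum_sub_distrib, Finset.sum_const, Finset.card_range, nsmul_eq_mul, ← Finset.mul_sum]
    rw [← h3eq, hncast, hmcast]
    ring
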